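-- pv_equiv track=rewrite | github.com/helloelora/jailbreak-interpretability-xai | scripts/analyze_jailbreak_styles.py | representative_prompts
-- ===== SOURCE A (Python) =====
-- from collections import Counter, defaultdict
--
-- def representative_prompts(records, n=2):
--     grouped = defaultdict(list)
--     for r in records:
--         grouped[(r["category"], r["primary_family"])].append(r)
--
--     reps = {}
--     for key, items in grouped.items():
--         reps[key] = items[:n]
--     return reps
-- ===== SOURCE B (Python) =====
-- def representative_prompts(records, n=2):
--     keys = []
--     for r in records:
--         k = (r["category"], r["primary_family"])
--         if k not in keys:
--             keys.append(k)
--     return {k: [r for r in records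
--                 if (r["category"], r["primary_family"]) == k][:n]
--             for k in keys}
-- ===== Notes on version B (the rewrite author's own statement) =====
-- stated objective: alternative
-- what changed: B replaces A's defaultdict grouping pass plus slicing pass by collecting the distinct key tuples in first-occurrence order and building each group directly with a per-key filter of the records, sliced to n.
import Mathlib
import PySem

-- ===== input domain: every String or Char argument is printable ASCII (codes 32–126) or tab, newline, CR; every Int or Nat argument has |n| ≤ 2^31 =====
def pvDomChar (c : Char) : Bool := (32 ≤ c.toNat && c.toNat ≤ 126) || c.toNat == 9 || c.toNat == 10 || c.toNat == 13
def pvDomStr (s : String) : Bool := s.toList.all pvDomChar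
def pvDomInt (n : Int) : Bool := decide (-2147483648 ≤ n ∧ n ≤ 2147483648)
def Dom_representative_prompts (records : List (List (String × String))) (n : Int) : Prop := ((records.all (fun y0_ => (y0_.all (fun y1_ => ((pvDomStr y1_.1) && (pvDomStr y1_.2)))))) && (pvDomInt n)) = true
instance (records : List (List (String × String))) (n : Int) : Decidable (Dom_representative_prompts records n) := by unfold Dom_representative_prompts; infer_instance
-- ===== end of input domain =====

-- B builds each group directly with a per-key filter over the records (distinct keys collected
-- first, in first-occurrence order) instead of A's defaultdict grouping pass; alternative
-- decomposition, same return value.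

-- r["category"] / r["primary_family"]: first-match dict lookup (Pre_ guarantees both keys exist)
def pvKeyOf (r : List (String × String)) : String × String :=
  (((PySem.Dict.mk r).get? "category").getD "", ((PySem.Dict.mk r).get? "primary_family").getD "")

-- ===== PORT A =====
def representative_prompts (records : List (List (String × String))) (n : Int) : List (String × String × List (List (String × String))) :=
  -- grouped = defaultdict(list); for r in records: grouped[(r["category"], r["primary_family"])].append(r)
  let grouped : PySem.Dict (String × String) (List (List (String × String))) :=
    records.foldl (fun d r => d.modify (pvKeyOf r) [] (· ++ [r])) PySem.Dict.empty
  -- reps = {}; for key, items in grouped.items(): reps[key] = items[:n]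
  let reps : PySem.Dict (String × String) (List (List (String × String))) :=
    grouped.items.foldl (fun d p => d.insert p.1 (PySem.List.slice p.2 none (some n))) PySem.Dict.empty
  reps.items.map (fun p => (p.1.1, p.1.2, p.2))

-- ===== PORT B =====
def representative_prompts_alt (records : List (List (String × String))) (n : Int) : List (String × String × List (List (String × String))) :=
  -- keys = []; for r in records: if k not in keys: keys.append(k)
  let keys : List (String × String) :=
    records.foldl (fun ks r => if pvKeyOf r ∈ ks then ks else ks ++ [pvKeyOf r]) []
  -- {k: [r for r in records if (r["category"], r["primary_family"]) == k][:n] for k in keys}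
  keys.map (fun k =>
    (k.1, k.2, PySem.List.slice (records.filter (fun r => pvKeyOf r == k)) none (some n)))

-- ===== PRECONDITION & SPEC =====
-- Pre_ excludes exactly the inputs where some record lacks a "category" or "primary_family"
-- key, on which A raises KeyError.
def Pre_representative_prompts (records : List (List (String × String))) (n : Int) : Prop :=
  ∀ r ∈ records, ((PySem.Dict.mk r).get? "category").isSome = true ∧ ((PySem.Dict.mk r).get? "primary_family").isSome = true
instance (records : List (List (String × String))) (n : Int) : Decidable (Pre_representative_prompts records n) := by unfold Pre_representative_prompts; infer_instance
def pvWitness_representative_prompts : (List (List (String × String))) × Int :=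
  ([[("category", "style"), ("primary_family", "dan"), ("prompt", "p1")],
    [("category", "style"), ("primary_family", "dan"), ("prompt", "p2")],
    [("category", "tone"), ("primary_family", "aim"), ("prompt", "p3")]], 2)

def Spec_representative_prompts (records : List (List (String × String))) (n : Int) (out : List (String × String × List (List (String × String)))) : Prop := out = representative_prompts_alt records n
instance (records : List (List (String × String))) (n : Int) (out : List (String × String × List (List (String × String)))) : Decidable (Spec_representative_prompts records n out) := by unfold Spec_representative_prompts; infer_instance

-- ===== CLAIM (what is proved, stated in full; the proofs are below) =====
def Claim_equal_representative_prompts : Prop := ∀ (records : List (List (String × String))) (n : Int), Dom_representative_prompts records n → Pre_representative_prompts records n → Spec_representative_prompts records n (representative_prompts records n)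

-- ===== LEMMAS AND PROOFS =====

-- B's "if k not in keys: keys.append(k)" loop is set insertion in first-occurrence order
theorem keysB_eq_update (records : List (List (String × String))) (s : PySem.Set (String × String)) :
    records.foldl (fun ks r => if pvKeyOf r ∈ ks then ks else ks ++ [pvKeyOf r]) s
      = PySem.Set.update s (records.map pvKeyOf) := by
  induction records generalizing s with
  | nil => rfl
  | cons x t ih =>
    simp only [List.foldl_cons, List.map_cons, PySem.Set.update, PySem.Set.add]
    rw [← PySem.Set.update, ← ih]
    congr 1
    by_cases h : pvKeyOf x ∈ s <;> simp [h]

-- A's grouping fold, characterised per key: each group is the filter of the records with that key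
theorem grouped_getD (records : List (List (String × String))) (k : String × String) :
    (records.foldl (fun d r => d.modify (pvKeyOf r) [] (· ++ [r]))
        (PySem.Dict.empty : PySem.Dict (String × String) (List (List (String × String))))).getD k []
      = records.filter (fun r => pvKeyOf r == k) := by
  have h := PySem.Dict.getD_foldl_modify_append
      (l := records.map (fun r => (pvKeyOf r, r)))
      (d := (PySem.Dict.empty : PySem.Dict (String × String) (List (List (String × String)))))
      (c := k)
  rw [List.foldl_map] at h
  rw [h, List.filter_map, List.map_map]
  simp [Function.comp_def]

-- ===== VERDICT (by name: the statement is the Claim_ definition above) =====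
theorem representative_prompts_spec : Claim_equal_representative_prompts := by
  intro records n _ _
  unfold Spec_representative_prompts representative_prompts representative_prompts_alt
  simp only []
  rw [keysB_eq_update]
  set grouped : PySem.Dict (String × String) (List (List (String × String))) :=
      records.foldl (fun d r => d.modify (pvKeyOf r) [] (· ++ [r])) PySem.Dict.empty with hg
  have hnd : grouped.keys.Nodup :=
    PySem.Dict.nodup_keys_foldl_modify_key records pvKeyOf [] (fun _ r => (· ++ [r])) PySem.Dict.empty (by simp)
  have hkeys : grouped.keys = PySem.Set.update ([] : PySem.Set (String × String)) (records.map pvKeyOf) := by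
    rw [hg, PySem.Dict.keys_foldl_modify_key]
    simp
  have hitems : grouped.items = grouped.keys.map (fun k => (k, grouped.getD k [])) :=
    PySem.Dict.items_eq_map_keys grouped hnd []
  have hfresh : (grouped.items.foldl (fun d p => d.insert p.1 (PySem.List.slice p.2 none (some n))) (PySem.Dict.empty : PySem.Dict (String × String) (List (List (String × String))))).items
      = PySem.Dict.empty.items ++ grouped.items.map (fun p => (p.1, PySem.List.slice p.2 none (some n))) := by
    apply PySem.Dict.items_foldl_insert_fresh
    · intro a _; simp
    · have : grouped.items.map (·.1) = grouped.keys := rfl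
      rw [this]; exact hnd
  have hemp : (PySem.Dict.empty : PySem.Dict (String × String) (List (List (String × String)))).items = [] := rfl
  rw [hfresh, hitems, hemp, List.nil_append, List.map_map, List.map_map, hkeys]
  apply List.map_congr_left
  intro k hk
  simp only [Function.comp_def]
  rw [hg, grouped_getD records k]
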